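-- pv_equiv track=rewrite | github.com/av1d/SP0256_simulator | sp0256.py | prune_punctuation
-- ===== SOURCE A (Python) =====
-- IGNORE_SPACES = True
--
-- IGNORE_PERIODS = True
--
-- IGNORE_COMMAS = True
--
-- def prune_punctuation(allophones: list) -> list:
--     """
--     Prune punctuation from a list of allophones based on user-defined flags.
--
--     Args:
--         list: list of allophone and punctuation WAV files.
--
--     Returns:
--         list: list of updated allophone and punctuation WAV files.
--     """
--     result = allophones.copy()  # create a copy of the input list
--     if IGNORE_SPACES:
--         result = [item for item in result if item != 'SPACE.wav']
--     if IGNORE_PERIODS: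
--         result = [item for item in result if item != 'PERIOD.wav']
--     if IGNORE_COMMAS:
--         result = [item for item in result if item != 'COMMA.wav']
--     return result
-- ===== SOURCE B (Python) =====
-- IGNORE_SPACES = True
--
-- IGNORE_PERIODS = True
--
-- IGNORE_COMMAS = True
--
-- def prune_punctuation(allophones: list) -> list:
--     remove = set()
--     if IGNORE_SPACES:
--         remove.add('SPACE.wav')
--     if IGNORE_PERIODS:
--         remove.add('PERIOD.wav')
--     if IGNORE_COMMAS:
--         remove.add('COMMA.wav')
--     return [item for item in allophones if item not in remove]
-- ===== Notes on version B (the rewrite author's own statement) =====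
-- stated objective: simpler
-- what changed: Builds a removal set once from the three flags and filters the list in a single pass, instead of three successive filter passes each rebuilding the list.
import Mathlib
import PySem

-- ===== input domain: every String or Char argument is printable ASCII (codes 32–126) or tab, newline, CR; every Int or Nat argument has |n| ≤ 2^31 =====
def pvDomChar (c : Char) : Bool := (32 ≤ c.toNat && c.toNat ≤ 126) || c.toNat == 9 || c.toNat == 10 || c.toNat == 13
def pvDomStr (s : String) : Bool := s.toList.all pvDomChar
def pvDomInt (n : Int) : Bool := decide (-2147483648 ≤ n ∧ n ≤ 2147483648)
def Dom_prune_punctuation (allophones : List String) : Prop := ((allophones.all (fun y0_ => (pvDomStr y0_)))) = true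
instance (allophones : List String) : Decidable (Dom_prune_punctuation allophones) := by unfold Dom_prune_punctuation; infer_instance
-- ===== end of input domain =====

-- B builds the removal set once from the flags and filters in a single pass, replacing A's three successive filter passes (objective: simpler).


-- ===== PORT A =====
def IGNORE_SPACES : Bool := true
def IGNORE_PERIODS : Bool := true
def IGNORE_COMMAS : Bool := true

def prune_punctuation (allophones : List String) : List String :=
  let result := allophones
  let result := if IGNORE_SPACES then result.filter (fun item => item != "SPACE.wav") else result
  let result := if IGNORE_PERIODS then result.filter (fun item => item != "PERIOD.wav") else result
  let result := if IGNORE_COMMAS then result.filter (fun item => item != "COMMA.wav") else result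
  result

-- ===== PORT B =====
def prune_punctuation_alt (allophones : List String) : List String :=
  let remove : PySem.Set String := PySem.Set.empty
  let remove := if IGNORE_SPACES then PySem.Set.add remove "SPACE.wav" else remove
  let remove := if IGNORE_PERIODS then PySem.Set.add remove "PERIOD.wav" else remove
  let remove := if IGNORE_COMMAS then PySem.Set.add remove "COMMA.wav" else remove
  allophones.filter (fun item => !(PySem.Set.contains remove item))

-- ===== PRECONDITION & SPEC =====
def Spec_prune_punctuation (allophones : List String) (out : List String) : Prop := out = prune_punctuation_alt allophones
instance (allophones : List String) (out : List String) : Decidable (Spec_prune_punctuation allophones out) := by unfold Spec_prune_punctuation; infer_instance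

-- ===== CLAIM (what is proved, stated in full; the proofs are below) =====
def Claim_equal_prune_punctuation : Prop := ∀ (allophones : List String), Dom_prune_punctuation allophones → Spec_prune_punctuation allophones (prune_punctuation allophones)

-- ===== LEMMAS AND PROOFS =====
theorem filter_filter_filter_eq (allophones : List String) :
    ((allophones.filter (fun item => item != "SPACE.wav")).filter
        (fun item => item != "PERIOD.wav")).filter (fun item => item != "COMMA.wav")
      = allophones.filter
          (fun item => !(PySem.Set.contains ["SPACE.wav", "PERIOD.wav", "COMMA.wav"] item)) := by
  simp only [List.filter_filter]
  apply List.filter_congr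
  intro x _
  by_cases h1 : x = "SPACE.wav" <;> by_cases h2 : x = "PERIOD.wav" <;>
    by_cases h3 : x = "COMMA.wav" <;> simp_all [PySem.Set.contains]

-- ===== VERDICT (by name: the statement is the Claim_ definition above) =====
theorem prune_punctuation_spec : Claim_equal_prune_punctuation := by
  intro allophones _
  unfold Spec_prune_punctuation prune_punctuation prune_punctuation_alt
  simpa [IGNORE_SPACES, IGNORE_PERIODS, IGNORE_COMMAS, PySem.Set.add, PySem.Set.empty,
    PySem.Set.contains] using filter_filter_filter_eq allophones
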